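-- pv_equiv track=rewrite | github.com/john-tanner-dev/drf-rust | drf_rust/sql_generator.py | _find_top_level_keyword
-- ===== SOURCE A (Python) =====
-- def _find_top_level_keyword(sql: str, keyword: str) -> int:
--     """
--     Find the start position of a keyword at the top level of SQL.
--     在 SQL 的顶层查找关键字的起始位置。
--
--     'Top level' means not inside:
--     "顶层" 意味着不在以下内容内部：
--       - Parentheses (subqueries, function calls) / 括号（子查询、函数调用）
--       - Single-quoted strings / 单引号字符串
--       - Double-quoted identifiers / 双引号标识符
--       - Backtick-quoted identifiers (MySQL) / 反引号标识符（MySQL）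
--
--     This is critical for correctly parsing SQL with subqueries — a naive
--     str.find() would match keywords inside subqueries and break the SQL.
--     这对于正确解析带子查询的 SQL 至关重要 —— 朴素的 str.find()
--     会匹配子查询内的关键字并破坏 SQL。
--
--     Returns the index of the keyword start, or -1 if not found.
--     返回关键字起始位置的索引，未找到则返回 -1。
--     """
--     target = keyword.upper()
--     upper = sql.upper()
--     target_len = len(target)
--     n = len(sql)
--     depth = 0  # Parenthesis nesting depth / 括号嵌套深度
--     i = 0
--
--     while i < n:
--         ch = sql[i]
--
--         # Skip single-quoted strings (e.g., 'value' or 'it''s escaped')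
--         # 跳过单引号字符串（如 'value' 或 'it''s escaped'）
--         if ch == "'":
--             i += 1
--             while i < n:
--                 if sql[i] == "'" and i + 1 < n and sql[i + 1] == "'":
--                     i += 2  # Escaped quote / 转义引号
--                 elif sql[i] == "'":
--                     i += 1
--                     break
--                 else:
--                     i += 1
--             continue
--
--         # Skip double-quoted identifiers (e.g., "table_name")
--         # 跳过双引号标识符（如 "table_name"）
--         if ch == '"':
--             i += 1
--             while i < n:
--                 if sql[i] == '"' and i + 1 < n and sql[i + 1] == '"':
--                     i += 2  # Escaped double quote / 转义双引号
--                 elif sql[i] == '"':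
--                     i += 1
--                     break
--                 else:
--                     i += 1
--             continue
--
--         # Skip backtick-quoted identifiers (MySQL style, e.g., `table_name`)
--         # 跳过反引号标识符（MySQL 风格，如 `table_name`）
--         if ch == '`':
--             i += 1
--             while i < n:
--                 if sql[i] == '`' and i + 1 < n and sql[i + 1] == '`':
--                     i += 2  # Escaped backtick / 转义反引号
--                 elif sql[i] == '`':
--                     i += 1
--                     break
--                 else:
--                     i += 1
--             continue
--
--         # Track parenthesis depth
--         # 跟踪括号深度
--         if ch == '(':
--             depth += 1
--             i += 1
--             continue
--         if ch == ')':
--             depth = max(0, depth - 1)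
--             i += 1
--             continue
--
--         # At depth 0 (top level): check for keyword match with word boundaries
--         # 在深度 0（顶层）：检查关键字匹配并验证词边界
--         if depth == 0 and i + target_len <= n:
--             if upper[i:i + target_len] == target:
--                 # Verify word boundaries (not part of a longer identifier)
--                 # 验证词边界（不是更长标识符的一部分）
--                 before_ok = (i == 0 or not upper[i - 1].isalnum())
--                 after_ok = (i + target_len >= n
--                             or not upper[i + target_len].isalnum())
--                 if before_ok and after_ok:
--                     return i
--
--         i += 1
--
--     return -1
-- ===== SOURCE B (Python) =====
-- def _find_top_level_keyword(sql: str, keyword: str) -> int: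
--     """Character-by-character state machine: one pass builds a boolean mask of
--     the top-level positions (depth 0, outside quoted regions), then a second
--     pass tries the keyword with word boundaries at each masked position."""
--     n = len(sql)
--     mask = []
--     depth, mode, skip = 0, None, False
--     for i, ch in enumerate(sql):
--         if skip:
--             mask.append(False)
--             skip = False
--         elif mode is not None:
--             mask.append(False)
--             if ch == mode:
--                 if i + 1 < n and sql[i + 1] == mode:
--                     skip = True  # doubled quote = escape
--                 else:
--                     mode = None
--         elif ch in ("'", '"', '`'):
--             mask.append(False)
--             mode = ch
--         elif ch == '(':
--             mask.append(False)
--             depth += 1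
--         elif ch == ')':
--             mask.append(False)
--             depth = max(0, depth - 1)
--         else:
--             mask.append(depth == 0)
--     target = keyword.upper()
--     upper = sql.upper()
--     L = len(target)
--     for i, ok in enumerate(mask):
--         if ok and i + L <= n and upper[i:i + L] == target and \
--            (i == 0 or not upper[i - 1].isalnum()) and \
--            (i + L >= n or not upper[i + L].isalnum()):
--             return i
--     return -1
-- ===== Notes on version B (the rewrite author's own statement) =====
-- stated objective: alternative
-- what changed: B replaces A's jumping scan with nested quote-skipping while-loops by a one-character-at-a-time state machine (depth, quote mode, escape flag) that builds a boolean mask of top-level positions in one uniform pass, followed by a separate matching pass over the mask.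
import Mathlib
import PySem

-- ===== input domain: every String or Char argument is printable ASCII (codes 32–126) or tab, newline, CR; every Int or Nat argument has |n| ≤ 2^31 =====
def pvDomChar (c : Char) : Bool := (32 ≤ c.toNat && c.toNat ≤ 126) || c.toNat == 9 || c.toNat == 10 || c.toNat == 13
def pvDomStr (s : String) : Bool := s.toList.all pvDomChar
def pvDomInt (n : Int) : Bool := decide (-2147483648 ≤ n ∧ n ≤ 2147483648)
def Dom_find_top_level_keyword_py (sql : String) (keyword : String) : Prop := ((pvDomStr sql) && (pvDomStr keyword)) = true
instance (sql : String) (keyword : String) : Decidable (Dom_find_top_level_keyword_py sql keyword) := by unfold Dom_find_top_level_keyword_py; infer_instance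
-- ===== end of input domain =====

-- B replaces A's nested while-loops (inner quote-skipping loops inside a jumping
-- outer scan) with a character-by-character state machine that builds a boolean
-- mask of top-level positions, then a second pass matching the keyword at masked
-- positions; same cost, no speed claim; return-value equivalence only.

-- ===== PORT A =====
-- A's inner `while` skipping a quoted region: i is just past the opening quote q;
-- returns the index after the closing quote (doubled q = escape; unterminated → n).
def pvSkipA (s : List Char) (q : Char) (i : Nat) : Nat :=
  if h : i < s.length then
    if s.getD i ' ' = q then
      if i + 1 < s.length ∧ s.getD (i+1) ' ' = q then pvSkipA s q (i+2)
      else i + 1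
    else pvSkipA s q (i+1)
  else i
termination_by s.length - i

-- needed only for the termination of the main loop below
theorem pvSkipA_ge (s : List Char) (q : Char) (i : Nat) : i ≤ pvSkipA s q i := by
  fun_induction pvSkipA s q i <;> omega

-- A's main `while i < n` loop; state (i, depth); Nat subtraction gives the
-- max(0, depth-1) clamp.  The three `if depth == 0 …` tests are one conjunction
-- (Python falls through to `i += 1` exactly when it is false).
def pvLoopA (s up tg : List Char) (i depth : Nat) : Int :=
  if h : i < s.length then
    if s.getD i ' ' = '\'' then pvLoopA s up tg (pvSkipA s '\'' (i+1)) depth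
    else if s.getD i ' ' = '"' then pvLoopA s up tg (pvSkipA s '"' (i+1)) depth
    else if s.getD i ' ' = '`' then pvLoopA s up tg (pvSkipA s '`' (i+1)) depth
    else if s.getD i ' ' = '(' then pvLoopA s up tg (i+1) (depth+1)
    else if s.getD i ' ' = ')' then pvLoopA s up tg (i+1) (depth-1)
    else if depth = 0 ∧ i + tg.length ≤ s.length
            ∧ (up.drop i).take tg.length = tg   -- upper[i:i+L] == target (slice in range)
            ∧ (i = 0 ∨ PySem.Chars.isalnum (up.getD (i-1) ' ') = false)
            ∧ (s.length ≤ i + tg.length ∨ PySem.Chars.isalnum (up.getD (i + tg.length) ' ') = false)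
      then (i : Int)
    else pvLoopA s up tg (i+1) depth
  else -1
termination_by s.length - i
decreasing_by
  · have := pvSkipA_ge s '\'' (i+1); omega
  · have := pvSkipA_ge s '"' (i+1); omega
  · have := pvSkipA_ge s '`' (i+1); omega
  all_goals omega

def find_top_level_keyword_py (sql : String) (keyword : String) : Int :=
  pvLoopA sql.toList (PySem.Chars.upper sql.toList) (PySem.Chars.upper keyword.toList) 0 0

-- ===== PORT B =====
-- B's pass 1: a one-character-at-a-time state machine over (depth, mode, skip);
-- mask[i] = True iff position i is top level (depth 0, outside quoted regions).
def pvMask (s : List Char) (i depth : Nat) (mode : Option Char) (skip : Bool) : List Bool :=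
  if i < s.length then
    if skip then false :: pvMask s (i+1) depth mode false
    else
      match mode with
      | some q =>
        false ::
          (if s.getD i ' ' = q then
            if i + 1 < s.length ∧ s.getD (i+1) ' ' = q then pvMask s (i+1) depth (some q) true
            else pvMask s (i+1) depth none false
          else pvMask s (i+1) depth (some q) false)
      | none =>
        if s.getD i ' ' = '\'' ∨ s.getD i ' ' = '"' ∨ s.getD i ' ' = '`' then
          false :: pvMask s (i+1) depth (some (s.getD i ' ')) false
        else if s.getD i ' ' = '(' then false :: pvMask s (i+1) (depth+1) none false
        else if s.getD i ' ' = ')' then false :: pvMask s (i+1) (depth-1) none false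
        else (depth == 0) :: pvMask s (i+1) depth none false
  else []
termination_by s.length - i

-- B's pass 2: walk the mask with a running index; first masked position where
-- the keyword matches with word boundaries.
def pvFind (up tg : List Char) (n j : Nat) : List Bool → Int
  | [] => -1
  | b :: rest =>
    if b = true ∧ j + tg.length ≤ n ∧ (up.drop j).take tg.length = tg
        ∧ (j = 0 ∨ PySem.Chars.isalnum (up.getD (j-1) ' ') = false)
        ∧ (n ≤ j + tg.length ∨ PySem.Chars.isalnum (up.getD (j + tg.length) ' ') = false)
    then (j : Int)
    else pvFind up tg n (j+1) rest

def find_top_level_keyword_py_alt (sql : String) (keyword : String) : Int :=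
  pvFind (PySem.Chars.upper sql.toList) (PySem.Chars.upper keyword.toList)
    sql.toList.length 0 (pvMask sql.toList 0 0 none false)

-- ===== PRECONDITION & SPEC =====
def Spec_find_top_level_keyword_py (sql : String) (keyword : String) (out : Int) : Prop := out = find_top_level_keyword_py_alt sql keyword
instance (sql : String) (keyword : String) (out : Int) : Decidable (Spec_find_top_level_keyword_py sql keyword out) := by unfold Spec_find_top_level_keyword_py; infer_instance

-- ===== CLAIM (what is proved, stated in full; the proofs are below) =====
def Claim_equal_find_top_level_keyword_py : Prop := ∀ (sql : String) (keyword : String), Dom_find_top_level_keyword_py sql keyword → Spec_find_top_level_keyword_py sql keyword (find_top_level_keyword_py sql keyword)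

-- ===== LEMMAS AND PROOFS =====

-- pvFind ignores a run of `false` entries, advancing the index
theorem pvFind_replicate (up tg : List Char) (n j k : Nat) (rest : List Bool) :
    pvFind up tg n j (List.replicate k false ++ rest) = pvFind up tg n (j + k) rest := by
  induction k generalizing j with
  | zero => simp
  | succ m ih =>
    rw [List.replicate_succ, List.cons_append, pvFind]
    simp only [Bool.false_eq_true, false_and, if_false]
    rw [ih]; ring_nf

theorem pvFind_cons (up tg : List Char) (n j : Nat) (b : Bool) (rest : List Bool) :
    pvFind up tg n j (b :: rest) =
      (if b = true ∧ j + tg.length ≤ n ∧ (up.drop j).take tg.length = tg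
          ∧ (j = 0 ∨ PySem.Chars.isalnum (up.getD (j-1) ' ') = false)
          ∧ (n ≤ j + tg.length ∨ PySem.Chars.isalnum (up.getD (j + tg.length) ' ') = false)
      then (j : Int) else pvFind up tg n (j+1) rest) := rfl

-- a `false` commutes across a run of `false`s
theorem pvConsRep (k : Nat) (X : List Bool) :
    false :: (List.replicate k false ++ X) = List.replicate k false ++ (false :: X) := by
  induction k with
  | zero => rfl
  | succ m ih => simp only [List.replicate_succ, List.cons_append, ih]

-- inside a quoted region, the state machine emits `false` up to the index
-- where A's inner skipping loop lands, then resumes in normal mode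
theorem pvMask_quote (s : List Char) (q : Char) (j depth : Nat) :
    pvMask s j depth (some q) false =
      List.replicate (pvSkipA s q j - j) false ++ pvMask s (pvSkipA s q j) depth none false := by
  fun_induction pvSkipA s q j with
  | case1 j h hq hq2 ih =>
    have hlt : j + 1 < s.length := hq2.1
    rw [pvMask]
    simp only [if_pos h, Bool.false_eq_true, if_false, if_pos hq, if_pos hq2]
    rw [pvMask]
    simp only [if_pos hlt, if_true]
    rw [ih, pvConsRep, pvConsRep]
    have hge := pvSkipA_ge s q (j+2)
    have heq : pvSkipA s q (j+2) - j = (pvSkipA s q (j+2) - (j+2)) + 2 := by omega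
    rw [heq, List.replicate_add, List.append_assoc]
    rfl
  | case2 j h hq hq2 =>
    rw [pvMask]
    simp only [if_pos h, Bool.false_eq_true, if_false, if_pos hq, if_neg hq2]
    have : j + 1 - j = 1 := by omega
    simp [this, List.replicate_succ]
  | case3 j h hq ih =>
    rw [pvMask]
    simp only [if_pos h, Bool.false_eq_true, if_false, if_neg hq]
    rw [ih, pvConsRep]
    have hge := pvSkipA_ge s q (j+1)
    have heq : pvSkipA s q (j+1) - j = (pvSkipA s q (j+1) - (j+1)) + 1 := by omega
    rw [heq, List.replicate_add, List.append_assoc]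
    rfl
  | case4 j h =>
    have hj : ¬ j < s.length := h
    rw [pvMask]
    simp only [if_neg hj]
    rw [pvMask]
    simp [hj]

-- main correspondence: A's loop from (i, depth) equals B's matcher run on the
-- machine's mask from the same state
theorem pvLoopA_eq (s up tg : List Char) (i depth : Nat) :
    pvLoopA s up tg i depth = pvFind up tg s.length i (pvMask s i depth none false) := by
  fun_induction pvLoopA s up tg i depth with
  | case1 i depth h hq ih =>
    rw [pvMask]
    simp only [if_pos h, Bool.false_eq_true, if_false, hq, true_or, if_true]
    rw [pvFind_cons]
    simp only [Bool.false_eq_true, false_and, if_false]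
    rw [pvMask_quote, pvFind_replicate]
    have hge := pvSkipA_ge s '\'' (i+1)
    have : i + 1 + (pvSkipA s '\'' (i+1) - (i+1)) = pvSkipA s '\'' (i+1) := by omega
    rw [this]; exact ih
  | case2 i depth h h1 hq ih =>
    rw [pvMask]
    simp only [if_pos h, Bool.false_eq_true, if_false, hq, true_or, or_true, if_true]
    rw [pvFind_cons]
    simp only [Bool.false_eq_true, false_and, if_false]
    rw [pvMask_quote, pvFind_replicate]
    have hge := pvSkipA_ge s '"' (i+1)
    have : i + 1 + (pvSkipA s '"' (i+1) - (i+1)) = pvSkipA s '"' (i+1) := by omega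
    rw [this]; exact ih
  | case3 i depth h h1 h2 hq ih =>
    rw [pvMask]
    simp only [if_pos h, Bool.false_eq_true, if_false, hq, or_true, if_true]
    rw [pvFind_cons]
    simp only [Bool.false_eq_true, false_and, if_false]
    rw [pvMask_quote, pvFind_replicate]
    have hge := pvSkipA_ge s '`' (i+1)
    have : i + 1 + (pvSkipA s '`' (i+1) - (i+1)) = pvSkipA s '`' (i+1) := by omega
    rw [this]; exact ih
  | case4 i depth h h1 h2 h3 hp ih =>
    have hnq : ¬ (s.getD i ' ' = '\'' ∨ s.getD i ' ' = '"' ∨ s.getD i ' ' = '`') := by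
      rintro (x | x | x) <;> [exact h1 x; exact h2 x; exact h3 x]
    rw [pvMask]
    simp only [if_pos h, Bool.false_eq_true, if_false, if_neg hnq, if_pos hp]
    rw [pvFind_cons]
    simp only [Bool.false_eq_true, false_and, if_false]
    exact ih
  | case5 i depth h h1 h2 h3 h4 hp ih =>
    have hnq : ¬ (s.getD i ' ' = '\'' ∨ s.getD i ' ' = '"' ∨ s.getD i ' ' = '`') := by
      rintro (x | x | x) <;> [exact h1 x; exact h2 x; exact h3 x]
    rw [pvMask]
    simp only [if_pos h, Bool.false_eq_true, if_false, if_neg hnq, if_neg h4, if_pos hp]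
    rw [pvFind_cons]
    simp only [Bool.false_eq_true, false_and, if_false]
    exact ih
  | case6 i depth h h1 h2 h3 h4 h5 hc =>
    have hnq : ¬ (s.getD i ' ' = '\'' ∨ s.getD i ' ' = '"' ∨ s.getD i ' ' = '`') := by
      rintro (x | x | x) <;> [exact h1 x; exact h2 x; exact h3 x]
    rw [pvMask]
    simp only [if_pos h, Bool.false_eq_true, if_false, if_neg hnq, if_neg h4, if_neg h5]
    rw [hc.1]
    rw [pvFind_cons]
    simp only [beq_self_eq_true, true_and]
    rw [if_pos (And.intro hc.2.1 (And.intro hc.2.2.1 (And.intro hc.2.2.2.1 hc.2.2.2.2)))]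
  | case7 i depth h h1 h2 h3 h4 h5 hc ih =>
    have hnq : ¬ (s.getD i ' ' = '\'' ∨ s.getD i ' ' = '"' ∨ s.getD i ' ' = '`') := by
      rintro (x | x | x) <;> [exact h1 x; exact h2 x; exact h3 x]
    rw [pvMask]
    simp only [if_pos h, Bool.false_eq_true, if_false, if_neg hnq, if_neg h4, if_neg h5]
    rw [pvFind_cons]
    by_cases hd : depth = 0
    · subst hd
      have hc' : ¬ ((((0:Nat) == 0) : Bool) = true ∧ i + tg.length ≤ s.length
          ∧ (up.drop i).take tg.length = tg
          ∧ (i = 0 ∨ PySem.Chars.isalnum (up.getD (i-1) ' ') = false)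
          ∧ (s.length ≤ i + tg.length ∨ PySem.Chars.isalnum (up.getD (i + tg.length) ' ') = false)) := by
        intro hx; exact hc (And.intro rfl hx.2)
      rw [if_neg hc']; exact ih
    · have hb : ((depth == 0 : Bool)) = false := by simpa using hd
      rw [hb]
      simp only [Bool.false_eq_true, false_and, if_false]
      exact ih
  | case8 i depth h =>
    have hj : ¬ i < s.length := h
    rw [pvMask]
    simp only [if_neg hj]
    rfl

-- ===== VERDICT (by name: the statement is the Claim_ definition above) =====
theorem find_top_level_keyword_py_spec : Claim_equal_find_top_level_keyword_py := by
  intro sql keyword _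
  unfold Spec_find_top_level_keyword_py find_top_level_keyword_py find_top_level_keyword_py_alt
  exact pvLoopA_eq _ _ _ 0 0
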